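-- pv_equiv track=rewrite | github.com/calband/Elections-Voting-2020 | lambdas/VotePost.py | verify_vote
-- ===== SOURCE A (Python) =====
-- def verify_vote(vote_json):
--     if not isinstance(vote_json, dict):
--         return False
--
--     reverse_vote = []
--
--     for key in vote_json.keys():
--         if not isinstance(key, str):
--             return False
--         val = vote_json[key]
--         if isinstance(val, str):
--             try:
--                 reverse_vote.append(int(val))
--             except ValueError:
--                 if val != "A":
--                     return False
--         else:
--             return False
--
--     return sorted(reverse_vote) == list(range(1, len(reverse_vote) + 1))  # Check if there is a pure ranked vote
-- ===== SOURCE B (Python) =====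
-- def verify_vote(vote_json):
--     if not isinstance(vote_json, dict):
--         return False
--
--     seen = set()
--     count = 0
--     for key, val in vote_json.items():
--         if not isinstance(key, str) or not isinstance(val, str):
--             return False
--         try:
--             v = int(val)
--         except ValueError:
--             if val != "A":
--                 return False
--             continue
--         if v in seen:
--             return False
--         seen.add(v)
--         count += 1
--
--     return all(1 <= v <= count for v in seen)
-- ===== Notes on version B (the rewrite author's own statement) =====
-- stated objective: alternative
-- what changed: The final sorted(reverse_vote)==range(1,n+1) permutation test is replaced by a one-pass set: the loop rejects a duplicate rank on sight (no list is ever built) and the tail is a linear check that every seen rank lies in [1, count], so nothing is sorted.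
import Mathlib
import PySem

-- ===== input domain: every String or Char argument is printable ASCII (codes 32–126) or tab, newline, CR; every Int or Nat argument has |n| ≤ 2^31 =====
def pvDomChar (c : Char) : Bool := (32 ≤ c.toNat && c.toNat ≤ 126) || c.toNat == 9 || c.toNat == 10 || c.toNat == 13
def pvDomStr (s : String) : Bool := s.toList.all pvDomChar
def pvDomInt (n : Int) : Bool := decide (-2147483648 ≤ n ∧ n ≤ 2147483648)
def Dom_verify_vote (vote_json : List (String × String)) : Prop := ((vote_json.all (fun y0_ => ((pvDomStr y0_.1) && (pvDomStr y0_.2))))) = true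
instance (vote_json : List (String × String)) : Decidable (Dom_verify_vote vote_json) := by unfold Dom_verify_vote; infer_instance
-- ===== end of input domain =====

-- B replaces A's sort-and-compare permutation test by a one-pass duplicate check (a set)
-- plus a linear range check over the seen ranks — objective: alternative algorithm, no sort.

-- ===== PORT A =====
-- A's for-loop: collect int(val) into reverse_vote; skip val == "A"; none = early 'return False'.
def verify_vote_loopA : List (String × String) → List Int → Option (List Int)
  | [], acc => some acc
  | (_, v) :: rest, acc =>
    match PySem.Int.ofStr? v with
    | some n => verify_vote_loopA rest (acc ++ [n])
    | none => if v == "A" then verify_vote_loopA rest acc else none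

def verify_vote (vote_json : List (String × String)) : Bool :=
  match verify_vote_loopA vote_json [] with
  | none => false
  | some rv =>
      PySem.List.sorted rv (fun x => x) == PySem.List.pyRange 1 ((rv.length : Int) + 1)

-- ===== PORT B =====
-- B's for-loop: maintain the set of seen ranks and their count; early False on a duplicate.
def verify_vote_loopB : List (String × String) → PySem.Set Int → Int → Option (PySem.Set Int × Int)
  | [], seen, count => some (seen, count)
  | (_, v) :: rest, seen, count =>
    match PySem.Int.ofStr? v with
    | some n =>
        if PySem.Set.contains seen n then none
        else verify_vote_loopB rest (PySem.Set.add seen n) (count + 1)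
    | none => if v == "A" then verify_vote_loopB rest seen count else none

def verify_vote_alt (vote_json : List (String × String)) : Bool :=
  match verify_vote_loopB vote_json PySem.Set.empty 0 with
  | none => false
  | some (seen, count) => seen.all (fun v => decide (1 ≤ v ∧ v ≤ count))

-- ===== PRECONDITION & SPEC =====
def Spec_verify_vote (vote_json : List (String × String)) (out : Bool) : Prop := out = verify_vote_alt vote_json
instance (vote_json : List (String × String)) (out : Bool) : Decidable (Spec_verify_vote vote_json out) := by unfold Spec_verify_vote; infer_instance

-- ===== CLAIM (what is proved, stated in full; the proofs are below) =====
def Claim_equal_verify_vote : Prop := ∀ (vote_json : List (String × String)), Dom_verify_vote vote_json → Spec_verify_vote vote_json (verify_vote vote_json)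

-- ===== LEMMAS AND PROOFS =====

-- loop A only ever appends to its accumulator
lemma loopA_prefix : ∀ (l : List (String × String)) (acc rv : List Int),
    verify_vote_loopA l acc = some rv → ∃ t, rv = acc ++ t := by
  intro l
  induction l with
  | nil => intro acc rv h; simp [verify_vote_loopA] at h; exact ⟨[], by simp [h]⟩
  | cons p rest ih =>
    intro acc rv h
    simp only [verify_vote_loopA] at h
    cases hv : PySem.Int.ofStr? p.2 with
    | some n =>
      rw [hv] at h
      obtain ⟨t, ht⟩ := ih _ _ h
      exact ⟨n :: t, by simp [ht]⟩
    | none =>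
      rw [hv] at h
      by_cases hA : p.2 == "A"
      · rw [if_pos hA] at h; exact ih _ _ h
      · rw [if_neg hA] at h; exact absurd h (by simp)

-- relation between the two loops, with matched accumulators
lemma loop_rel : ∀ (l : List (String × String)) (acc : List Int), acc.Nodup →
    verify_vote_loopB l acc (acc.length : Int) =
      (match verify_vote_loopA l acc with
       | none => none
       | some rv => if rv.Nodup then some (rv, (rv.length : Int)) else none) := by
  intro l
  induction l with
  | nil => intro acc h; simp [verify_vote_loopA, verify_vote_loopB, h]
  | cons p rest ih =>
    intro acc h
    simp only [verify_vote_loopA, verify_vote_loopB]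
    cases hv : PySem.Int.ofStr? p.2 with
    | some n =>
      dsimp only
      by_cases hmem : n ∈ acc
      · have hc : PySem.Set.contains acc n = true := by
          simp [PySem.Set.contains, hmem]
        rw [if_pos hc]
        cases hA : verify_vote_loopA rest (acc ++ [n]) with
        | none => rfl
        | some rv =>
          obtain ⟨t, ht⟩ := loopA_prefix _ _ _ hA
          have hnn : ¬ rv.Nodup := by
            intro hnd
            rw [ht] at hnd
            have h1 : (acc ++ [n]).Nodup := (List.nodup_append.mp hnd).1
            have h2 := (List.nodup_append.mp h1).2.2
            simp at h2
            exact h2 _ hmem rfl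
          dsimp only
          rw [if_neg hnn]
      · have hc : PySem.Set.contains acc n = false := by
          simpa [PySem.Set.contains] using hmem
        rw [hc]
        rw [if_neg (by simp)]
        have hadd : PySem.Set.add acc n = acc ++ [n] := by
          simp [PySem.Set.add, PySem.Set.contains, hmem]
        have hnd : (acc ++ [n]).Nodup := by
          simp [List.nodup_append, h]
          exact fun a ha han => hmem (han ▸ ha)
        have hlen : ((acc.length : Int) + 1) = (((acc ++ [n]).length : Int)) := by
          simp
        rw [hadd, hlen, ih _ hnd]
    | none =>
      dsimp only
      by_cases hA : p.2 == "A"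
      · rw [if_pos hA]; rw [if_pos hA]; exact ih _ h
      · rw [if_neg hA]; rw [if_neg hA]

-- pyRange 1 (n+1) is [1, …, n]
lemma pyRangeN_succ (n : Nat) :
    PySem.List.pyRange 1 ((n + 1 : Nat) + 1 : Int) = PySem.List.pyRange 1 ((n : Int) + 1) ++ [(n : Int) + 1] := by
  have h : ((n + 1 : Nat) + 1 : Int) = ((n : Int) + 1) + 1 := by push_cast; ring
  rw [h, PySem.List.pyRange_one_succ_right (by omega)]

lemma pyRangeN_length (n : Nat) : (PySem.List.pyRange 1 ((n : Int) + 1)).length = n := by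
  induction n with
  | zero => decide
  | succ m ih => rw [pyRangeN_succ m]; simp [ih]

lemma pyRangeN_pairwise (n : Nat) :
    (PySem.List.pyRange 1 ((n : Int) + 1)).Pairwise (· < ·) := by
  induction n with
  | zero => decide
  | succ m ih =>
    rw [pyRangeN_succ m]
    rw [List.pairwise_append]
    refine ⟨ih, by simp, ?_⟩
    intro a ha b hb
    rw [PySem.List.mem_pyRange_one] at ha
    simp at hb
    omega

lemma pyRangeN_nodup (n : Nat) : (PySem.List.pyRange 1 ((n : Int) + 1)).Nodup :=
  (pyRangeN_pairwise n).imp (fun h => ne_of_lt h)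

-- the heart: sorted(rv) == [1..len(rv)]  ⟺  every element of a duplicate-free rv lies in [1, len(rv)]
lemma perm_check (rv : List Int) (h : rv.Nodup) :
    (PySem.List.sorted rv (fun x => x) == PySem.List.pyRange 1 ((rv.length : Int) + 1)) =
      rv.all (fun v => decide (1 ≤ v ∧ v ≤ (rv.length : Int))) := by
  by_cases hall : ∀ v ∈ rv, 1 ≤ v ∧ v ≤ (rv.length : Int)
  · have hsub : rv ⊆ PySem.List.pyRange 1 ((rv.length : Int) + 1) := by
      intro v hv
      rw [PySem.List.mem_pyRange_one]
      have := hall v hv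
      omega
    have hperm : rv.Perm (PySem.List.pyRange 1 ((rv.length : Int) + 1)) :=
      (List.subperm_of_subset h hsub).perm_of_length_le (by rw [pyRangeN_length])
    have heq : PySem.List.sorted rv (fun x => x) = PySem.List.pyRange 1 ((rv.length : Int) + 1) :=
      PySem.List.sorted_eq_of_perm_of_pairwise_lt _ _ _ hperm.symm (pyRangeN_pairwise _)
    rw [heq]
    simp only [beq_self_eq_true]
    symm
    rw [List.all_eq_true]
    intro v hv
    simpa using hall v hv
  · have hne : PySem.List.sorted rv (fun x => x) ≠ PySem.List.pyRange 1 ((rv.length : Int) + 1) := by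
      intro heq
      apply hall
      intro v hv
      have hmem : v ∈ PySem.List.pyRange 1 ((rv.length : Int) + 1) := by
        rw [← heq]
        exact (PySem.List.mem_sorted rv (fun x => x) false v).mpr hv
      rw [PySem.List.mem_pyRange_one] at hmem
      omega
    have h2 : rv.all (fun v => decide (1 ≤ v ∧ v ≤ (rv.length : Int))) = false := by
      rw [List.all_eq_false]
      push_neg at hall
      obtain ⟨v, hv, hnv⟩ := hall
      exact ⟨v, hv, by simpa using hnv⟩
    rw [h2, beq_eq_false_iff_ne.mpr hne]

-- if rv has a duplicate, A's sorted-vs-range test is False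
lemma perm_check_dup (rv : List Int) (h : ¬ rv.Nodup) :
    (PySem.List.sorted rv (fun x => x) == PySem.List.pyRange 1 ((rv.length : Int) + 1)) = false := by
  rw [beq_eq_false_iff_ne]
  intro heq
  apply h
  have h1 : rv.Perm (PySem.List.sorted rv (fun x => x)) := (PySem.List.sorted_perm rv _ false).symm
  rw [heq] at h1
  exact h1.nodup_iff.mpr (pyRangeN_nodup _)

-- ===== VERDICT (by name: the statement is the Claim_ definition above) =====
theorem verify_vote_spec : Claim_equal_verify_vote := by
  intro vote_json _
  unfold Spec_verify_vote verify_vote verify_vote_alt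
  have h : verify_vote_loopB vote_json PySem.Set.empty 0 =
      (match verify_vote_loopA vote_json [] with
       | none => none
       | some rv => if rv.Nodup then some (rv, (rv.length : Int)) else none) := by
    simpa [PySem.Set.empty] using loop_rel vote_json [] List.nodup_nil
  rw [h]
  cases hA : verify_vote_loopA vote_json [] with
  | none => rfl
  | some rv =>
    dsimp only
    by_cases hnd : rv.Nodup
    · rw [if_pos hnd]
      exact perm_check rv hnd
    · rw [if_neg hnd]
      exact perm_check_dup rv hnd
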